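-- pv_equiv track=rewrite | github.com/Learn-Everything-Leo/leetcode_problems | satisfies_conditions.py | satisfiesConditions
-- ===== SOURCE A (Python) =====
-- from typing import List
--
-- def satisfiesConditions(grid: List[List[int]]) -> bool:
--     for i in range(len(grid)):
--         for j in range(len(grid[0])):
--             if i + 1 < len(grid) and grid[i][j] != grid[i + 1][j]:
--                 return False
--             if j + 1 < len(grid[0]) and grid[i][j] == grid[i][j + 1]:
--                 return False
--     return True
-- ===== SOURCE B (Python) =====
-- from typing import List
--
-- def satisfiesConditions(grid: List[List[int]]) -> bool:
--     if not grid: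
--         return True
--     head = grid[0]
--     return all(row == head for row in grid) and all(
--         head[j] != head[j + 1] for j in range(len(head) - 1)
--     )
-- ===== Notes on version B (the rewrite author's own statement) =====
-- stated objective: simpler
-- what changed: Replaces the interleaved per-cell index walk with two whole-structure passes: all rows must equal the first row (column-equality) and the first row must have no equal adjacent pair (row-distinctness).
-- outside the precondition, e.g. on satisfiesConditions([[1, 2], [1, 2, 2]]): A returns True, B returns False; on satisfiesConditions([[1, 2, 3], [1, 5]]): A returns False, B returns False; on satisfiesConditions([[1, 2], [1]]): A raises IndexError, B returns False
import Mathlib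
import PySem

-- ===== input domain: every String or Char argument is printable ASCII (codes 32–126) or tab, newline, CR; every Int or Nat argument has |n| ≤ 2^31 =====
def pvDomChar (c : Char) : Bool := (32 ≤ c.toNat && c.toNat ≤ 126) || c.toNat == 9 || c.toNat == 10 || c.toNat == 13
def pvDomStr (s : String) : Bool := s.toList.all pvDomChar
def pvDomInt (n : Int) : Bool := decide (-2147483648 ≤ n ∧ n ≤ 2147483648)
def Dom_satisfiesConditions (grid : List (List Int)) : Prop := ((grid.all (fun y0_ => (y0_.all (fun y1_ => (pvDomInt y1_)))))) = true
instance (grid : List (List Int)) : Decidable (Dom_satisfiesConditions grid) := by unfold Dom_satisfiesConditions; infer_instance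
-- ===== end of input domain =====

-- B checks column-equality as whole-row equality with the first row, then adjacency on the
-- first row only, instead of A's interleaved per-cell index walk (objective: simpler).

-- ===== PORT A =====
-- grid[i][j] for in-range indices (Pre_ keeps every access in range)
def pvCell (grid : List (List Int)) (i j : Int) : Int :=
  PySem.List.pyGetD (PySem.List.pyGetD grid i []) j 0

def satisfiesConditions (grid : List (List Int)) : Bool :=
  let n : Int := grid.length
  let m : Int := (PySem.List.pyGetD grid 0 []).length
  (PySem.List.pyRange 0 n 1).all (fun i =>
    (PySem.List.pyRange 0 m 1).all (fun j =>
      if i + 1 < n ∧ pvCell grid i j ≠ pvCell grid (i + 1) j then false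
      else if j + 1 < m ∧ pvCell grid i j = pvCell grid i (j + 1) then false
      else true))

-- ===== PORT B =====
def satisfiesConditions_alt (grid : List (List Int)) : Bool :=
  match grid with
  | [] => true
  | head :: _ =>
    grid.all (fun row => row == head) &&
    (PySem.List.pyRange 0 ((head.length : Int) - 1) 1).all (fun j =>
      PySem.List.pyGetD head j 0 != PySem.List.pyGetD head (j + 1) 0)

-- ===== PRECONDITION & SPEC =====
-- Pre_ admits rectangular grids (the task's natural domain) and, additionally, ragged grids
-- whose first two rows are nonempty and already differ at column 0 (A returns False at the
-- first cell there, and so does B).  It excludes the remaining ragged grids, on which A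
-- either raises IndexError or returns a value judged only on the first len(grid[0]) columns.
def Pre_satisfiesConditions (grid : List (List Int)) : Prop :=
  (∀ row ∈ grid, row.length = (grid.headD []).length) ∨
  (2 ≤ grid.length ∧ grid.getD 0 [] ≠ [] ∧ grid.getD 1 [] ≠ [] ∧
    (grid.getD 0 []).headD 0 ≠ (grid.getD 1 []).headD 0)
instance (grid : List (List Int)) : Decidable (Pre_satisfiesConditions grid) := by
  unfold Pre_satisfiesConditions; infer_instance

def pvWitness_satisfiesConditions : List (List Int) := [[1, 2], [1, 2]]

def Spec_satisfiesConditions (grid : List (List Int)) (out : Bool) : Prop := out = satisfiesConditions_alt grid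
instance (grid : List (List Int)) (out : Bool) : Decidable (Spec_satisfiesConditions grid out) := by unfold Spec_satisfiesConditions; infer_instance

-- ===== CLAIM (what is proved, stated in full; the proofs are below) =====
def Claim_equal_satisfiesConditions : Prop := ∀ (grid : List (List Int)), Dom_satisfiesConditions grid → Pre_satisfiesConditions grid → Spec_satisfiesConditions grid (satisfiesConditions grid)

-- ===== LEMMAS AND PROOFS =====

-- Column-equality of consecutive rows ↔ every row equals the head (given equal lengths).
lemma consec_iff_all_eq (head : List Int) (rest : List (List Int))
    (hlen : ∀ row ∈ rest, row.length = head.length) :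
    (∀ i : Nat, i + 1 < (head :: rest).length → ∀ j : Nat, j < head.length →
        ((head :: rest).getD i []).getD j 0 = ((head :: rest).getD (i + 1) []).getD j 0)
    ↔ ∀ row ∈ rest, row = head := by
  induction rest generalizing head with
  | nil => simp
  | cons r rs ih =>
    have hr : r.length = head.length := hlen r (by simp)
    constructor
    · intro h
      have hhr : r = head := by
        apply List.ext_getElem (by omega)
        intro j hj1 hj2
        have := h 0 (by simp) j (by omega)
        simpa [List.getD, hj1, hj2] using this.symm
      intro row hrow
      rcases List.mem_cons.1 hrow with h1 | h2
      · exact h1.trans hhr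
      · have := (ih r (fun row hm => (hlen row (by simp [hm])).trans hr.symm)).1
          (fun i hi j hj => h (i + 1) (by simpa using hi) j (by omega))
          _ h2
        exact this.trans hhr
    · intro h i hi j hj
      have hall : ∀ k : Nat, k < (head :: r :: rs).length →
          ((head :: r :: rs).getD k []).getD j 0 = head.getD j 0 := by
        intro k hk
        have hmem : (head :: r :: rs).getD k [] ∈ head :: r :: rs := by
          rw [List.getD_eq_getElem _ _ hk]; exact List.getElem_mem hk
        rcases List.mem_cons.1 hmem with h1 | h2
        · rw [h1]
        · rw [h _ h2]
      have hi' : i + 1 < rs.length + 2 := by simpa using hi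
      rw [hall i (by simp; omega), hall (i + 1) (by simp; omega)]

-- An all over pyRange 0 n 1 for an arbitrary Int bound.
lemma all_pyRange_iff' (n : Int) (f : Int → Bool) :
    ((PySem.List.pyRange 0 n 1).all f = true) ↔ ∀ k : Nat, (k : Int) < n → f (k : Int) = true := by
  rw [List.all_eq_true]
  constructor
  · intro h k hk
    exact h _ ((PySem.List.mem_pyRange_one).2 (by constructor <;> omega))
  · intro h x hx
    obtain ⟨h0, hn⟩ := (PySem.List.mem_pyRange_one).1 hx
    have := h x.toNat (by omega)
    rwa [Int.toNat_of_nonneg h0] at this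

lemma ite2 (c1 c2 : Prop) [Decidable c1] [Decidable c2] :
    ((if c1 then false else if c2 then false else true) = true) ↔ ¬c1 ∧ ¬c2 := by
  split_ifs <;> simp_all

lemma A_iff (head : List Int) (rest : List (List Int)) :
    satisfiesConditions (head :: rest) = true ↔
      (∀ i : Nat, i + 1 < (head :: rest).length → ∀ j : Nat, j < head.length →
          ((head :: rest).getD i []).getD j 0 = ((head :: rest).getD (i + 1) []).getD j 0) ∧
      (∀ i : Nat, i < (head :: rest).length → ∀ j : Nat, j + 1 < head.length →
          ((head :: rest).getD i []).getD j 0 ≠ ((head :: rest).getD i []).getD (j + 1) 0) := by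
  simp only [satisfiesConditions, pvCell, PySem.List.pyGetD_zero_cons, all_pyRange_iff',
    ← Nat.cast_add_one, PySem.List.pyGetD_natCast, ite2, List.length_cons, Nat.cast_lt]
  constructor
  · intro h
    refine ⟨fun i hi j hj => ?_, fun i hi j hj => ?_⟩
    · have := (h i (by omega) j (by omega)).1
      by_contra hne
      exact this ⟨by omega, hne⟩
    · intro heq
      exact (h i (by omega) j (by omega)).2 ⟨by omega, heq⟩
  · rintro ⟨h1, h2⟩ i hi j hj
    constructor
    · rintro ⟨hi1, hne⟩
      exact hne (h1 i (by omega) j (by omega))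
    · rintro ⟨hj1, heq⟩
      exact h2 i (by omega) j (by omega) heq

lemma pyGetD_natCast_succ (xs : List Int) (j : Nat) (d : Int) :
    PySem.List.pyGetD xs ((j : Int) + 1) d = xs.getD (j + 1) d := by
  rw [show ((j : Int) + 1) = ((j + 1 : Nat) : Int) from by push_cast; ring,
    PySem.List.pyGetD_natCast]

lemma B_iff (head : List Int) (rest : List (List Int)) :
    satisfiesConditions_alt (head :: rest) = true ↔
      (∀ row ∈ head :: rest, row = head) ∧
      (∀ j : Nat, j + 1 < head.length → head.getD j 0 ≠ head.getD (j + 1) 0) := by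
  simp only [satisfiesConditions_alt, Bool.and_eq_true, List.all_eq_true, beq_iff_eq,
    bne_iff_ne, ne_eq]
  constructor
  · rintro ⟨h1, h2⟩
    refine ⟨h1, fun j hj => ?_⟩
    have h := h2 (j : Int) ((PySem.List.mem_pyRange_one).2 ⟨by omega, by omega⟩)
    rw [pyGetD_natCast_succ, PySem.List.pyGetD_natCast] at h
    simpa using h
  · rintro ⟨h1, h2⟩
    refine ⟨h1, fun x hx => ?_⟩
    obtain ⟨h0, hn⟩ := (PySem.List.mem_pyRange_one).1 hx
    have hxj : x = ((x.toNat : Nat) : Int) := by omega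
    rw [hxj, pyGetD_natCast_succ, PySem.List.pyGetD_natCast]
    simpa using h2 x.toNat (by omega)

lemma getD_zero_eq_headD (l : List Int) (d : Int) : l.getD 0 d = l.headD d := by
  cases l <;> rfl

lemma A_false_first (r0 r1 : List Int) (rs : List (List Int)) (h0 : r0 ≠ [])
    (hne : r0.headD 0 ≠ r1.headD 0) :
    satisfiesConditions (r0 :: r1 :: rs) = false := by
  have hc0 : pvCell (r0 :: r1 :: rs) 0 0 = r0.headD 0 := by
    unfold pvCell
    rw [PySem.List.pyGetD_zero_cons, PySem.List.pyGetD_zero, getD_zero_eq_headD]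
  have hc1 : pvCell (r0 :: r1 :: rs) (0 + 1) 0 = r1.headD 0 := by
    unfold pvCell
    rw [show ((0 : Int) + 1) = ((1 : Nat) : Int) from by norm_num, PySem.List.pyGetD_natCast]
    show PySem.List.pyGetD r1 0 0 = r1.headD 0
    rw [PySem.List.pyGetD_zero, getD_zero_eq_headD]
  simp only [satisfiesConditions, PySem.List.pyGetD_zero_cons]
  rw [List.all_eq_false]
  refine ⟨0, (PySem.List.mem_pyRange_one).2
    ⟨by omega, by simp only [List.length_cons]; push_cast; omega⟩, ?_⟩
  rw [Bool.not_eq_true, List.all_eq_false]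
  refine ⟨0, (PySem.List.mem_pyRange_one).2
    ⟨by omega, by have := List.length_pos_iff.2 h0; omega⟩, ?_⟩
  rw [if_pos ⟨by simp only [List.length_cons]; push_cast; omega, by rw [hc0, hc1]; exact hne⟩]
  simp

lemma B_false_first (r0 r1 : List Int) (rs : List (List Int))
    (hne : r0.headD 0 ≠ r1.headD 0) :
    satisfiesConditions_alt (r0 :: r1 :: rs) = false := by
  have hr : ¬(r1 = r0) := fun h => hne (by rw [h])
  simp only [satisfiesConditions_alt]
  rw [List.all_eq_false.2 ⟨r1, by simp, by simpa using hr⟩, Bool.false_and]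

theorem satisfiesConditions_spec : Claim_equal_satisfiesConditions := by
  intro grid _ hpre
  unfold Spec_satisfiesConditions
  rcases hpre with hrect | ⟨hn, h0, h1, hne⟩
  · cases grid with
    | nil => rfl
    | cons head rest =>
      have hlen : ∀ row ∈ rest, row.length = head.length := fun row h => by
        simpa using hrect row (by simp [h])
      rw [Bool.eq_iff_iff, A_iff, B_iff]
      constructor
      · rintro ⟨h1, h2⟩
        have hE : ∀ row ∈ rest, row = head := (consec_iff_all_eq head rest hlen).1 h1
        refine ⟨?_, ?_⟩
        · intro row hrow
          rcases List.mem_cons.1 hrow with h | h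
          · exact h
          · exact hE _ h
        · intro j hj
          exact h2 0 (by simp) j hj
      · rintro ⟨hE, hH⟩
        have hE' : ∀ row ∈ rest, row = head := fun row h => hE row (by simp [h])
        have hrow : ∀ i, i < (head :: rest).length → (head :: rest).getD i [] = head := by
          intro i hi
          rw [List.getD_eq_getElem _ _ hi]
          rcases List.mem_cons.1 (List.getElem_mem hi) with h | h
          · exact h
          · exact hE' _ h
        refine ⟨(consec_iff_all_eq head rest hlen).2 hE', ?_⟩
        intro i hi j hj
        rw [hrow i hi]
        exact hH j hj
  · match grid, hn with
    | r0 :: r1 :: rs, _ =>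
      have h0' : r0 ≠ [] := by simpa using h0
      have hne' : r0.headD 0 ≠ r1.headD 0 := by simpa using hne
      rw [A_false_first r0 r1 rs h0' hne', B_false_first r0 r1 rs hne']
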